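-- pv_equiv track=rewrite | github.com/ziyun-li/Algorithms | Optimal_Allocation_dynamic_programming.py | solution
-- ===== SOURCE A (Python) =====
-- def solution(total_credit):
--     """
--     This algorithm allocates credits to workers(minions).
--     However it must follow a set of rules. (inspired by Google challenge)
--     1) The most junior minion (with the least seniority) gets exactly 1 credit.
--     2) A minion will revolt if the person who ranks immediately above them gets more than double the number of credits they do.
--     3) A minion will revolt if the amount of credits given to their next two subordinates combined is more than the number of credits they get.
--     4) You can always find more minions to pay
--
--     This function finds an integer which represents the difference between the minimum and maximum number of minions who can share the credits.
--     """
--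
-- #calculate generous strategy
--     generous_list =[1]
--     generous_credit = 1
--     generous_minion_count = 1
--     generous_creditleft = total_credit - 1
--     while generous_creditleft >= generous_list[-1]*2:
--         generous_credit = generous_list[-1]*2
--         generous_list.append(generous_credit)
--         generous_creditleft -= generous_credit
--         generous_minion_count += 1
--
-- #calculate stingy strategy
--     stingy_minion_count = 1
--     if total_credit > 1:
--         stingy_list = [1,1]
--         stingy_minion_count = 2
--         stingy_creditleft = total_credit - 2
--         while stingy_creditleft >= stingy_list[stingy_minion_count-2] + stingy_list[stingy_minion_count-1]:
--             stingy_credit = stingy_list[stingy_minion_count-2] + stingy_list[stingy_minion_count-1]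
--             stingy_list.append(stingy_credit)
--             stingy_minion_count += 1
--             stingy_creditleft -= stingy_credit
--
--     return  stingy_minion_count - generous_minion_count
-- ===== SOURCE B (Python) =====
-- def solution(total_credit):
--     # Generous strategy in closed form: allocations 1,2,4,...,2^(k-1) use 2^k-1
--     # credits, so the count is the largest k with 2^k - 1 <= total_credit (at
--     # least one minion is always hired).
--     if total_credit < 1:
--         generous_minion_count = 1
--     else:
--         generous_minion_count = max(1, (total_credit + 1).bit_length() - 1)
--
--     # Stingy strategy: Fibonacci-like payments tracked with two running
--     # variables instead of a list.
--     stingy_minion_count = 1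
--     if total_credit > 1:
--         a, b = 1, 1
--         stingy_minion_count = 2
--         creditleft = total_credit - 2
--         while creditleft >= a + b:
--             a, b = b, a + b
--             creditleft -= b
--             stingy_minion_count += 1
--
--     return stingy_minion_count - generous_minion_count
-- ===== Notes on version B (the rewrite author's own statement) =====
-- stated objective: simpler
-- what changed: Replaces the generous doubling loop and its list with a closed form via bit_length (the generous payments are successive powers of two, so their total is one less than the next power of two), and replaces the stingy list with a two-variable Fibonacci accumulation.
import Mathlib
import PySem

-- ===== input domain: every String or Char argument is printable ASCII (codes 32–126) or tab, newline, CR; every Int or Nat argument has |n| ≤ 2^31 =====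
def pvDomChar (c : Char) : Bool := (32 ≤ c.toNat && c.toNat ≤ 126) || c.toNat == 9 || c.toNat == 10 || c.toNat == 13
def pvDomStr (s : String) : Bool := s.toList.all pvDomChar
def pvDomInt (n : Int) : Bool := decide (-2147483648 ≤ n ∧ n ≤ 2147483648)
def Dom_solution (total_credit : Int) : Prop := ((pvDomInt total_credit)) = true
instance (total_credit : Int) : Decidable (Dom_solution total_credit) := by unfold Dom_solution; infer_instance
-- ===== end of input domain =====

-- B computes the generous count in closed form via bit_length and tracks the stingy
-- Fibonacci payments with two running variables instead of a list (objective: simpler).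

-- ===== PORT A =====
-- while generous_creditleft >= generous_list[-1]*2: ...  (fuel bounds the loop; the
-- list is nonempty at every call, so generous_list[-1] never raises and getD is exact)
def genLoop (fuel : Nat) (lst : List Int) (creditleft count : Int) : Int :=
  match fuel with
  | 0 => count
  | f + 1 =>
    let last := PySem.List.pyGetD lst (-1) 0
    if creditleft ≥ last * 2 then
      genLoop f (lst ++ [last * 2]) (creditleft - last * 2) (count + 1)
    else count

-- while stingy_creditleft >= stingy_list[count-2] + stingy_list[count-1]: ...
-- (count = len(stingy_list) ≥ 2 at every call, so both indices are in range and getD is exact)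
def stingyLoop (fuel : Nat) (lst : List Int) (count creditleft : Int) : Int :=
  match fuel with
  | 0 => count
  | f + 1 =>
    let s := PySem.List.pyGetD lst (count - 2) 0 + PySem.List.pyGetD lst (count - 1) 0
    if creditleft ≥ s then
      stingyLoop f (lst ++ [s]) (count + 1) (creditleft - s)
    else count

def solution (total_credit : Int) : Int :=
  let generous := genLoop (total_credit.toNat + 1) [1] (total_credit - 1) 1
  let stingy :=
    if total_credit > 1 then
      stingyLoop (total_credit.toNat + 1) [1, 1] 2 (total_credit - 2)
    else 1
  stingy - generous

-- ===== PORT B =====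
-- while creditleft >= a + b: a, b = b, a + b ...
def stingyLoopAlt (fuel : Nat) (a b creditleft count : Int) : Int :=
  match fuel with
  | 0 => count
  | f + 1 =>
    if creditleft ≥ a + b then
      stingyLoopAlt f b (a + b) (creditleft - (a + b)) (count + 1)
    else count

def solution_alt (total_credit : Int) : Int :=
  let generous : Int :=
    if total_credit < 1 then 1
    else max 1 ((PySem.Int.bitLength (total_credit + 1) : Int) - 1)
  let stingy :=
    if total_credit > 1 then
      stingyLoopAlt (total_credit.toNat + 1) 1 1 (total_credit - 2) 2
    else 1
  stingy - generous

-- ===== PRECONDITION & SPEC =====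
def Spec_solution (total_credit : Int) (out : Int) : Prop := out = solution_alt total_credit
instance (total_credit : Int) (out : Int) : Decidable (Spec_solution total_credit out) := by unfold Spec_solution; infer_instance

-- ===== CLAIM (what is proved, stated in full; the proofs are below) =====
def Claim_equal_solution : Prop := ∀ (total_credit : Int), Dom_solution total_credit → Spec_solution total_credit (solution total_credit)

-- ===== LEMMAS AND PROOFS =====

-- The two stingy loops run in lockstep: A's list always ends in the two running
-- variables of B, and count = length of A's list.
theorem stingy_eq (fuel : Nat) : ∀ (init : List Int) (a b cl : Int),
    stingyLoop fuel (init ++ [a, b]) ((init.length : Int) + 2) cl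
      = stingyLoopAlt fuel a b cl ((init.length : Int) + 2) := by
  induction fuel with
  | zero => intro init a b cl; rfl
  | succ f ih =>
    intro init a b cl
    have h2 : PySem.List.pyGetD (init ++ [a, b]) ((init.length : Int) + 2 - 2) 0 = a := by
      have he : ((init.length : Int) + 2 - 2) = ((init.length : Nat) : Int) := by ring
      rw [he, PySem.List.pyGetD_natCast]
      simp [List.getD_eq_getElem?_getD]
    have h1 : PySem.List.pyGetD (init ++ [a, b]) ((init.length : Int) + 2 - 1) 0 = b := by
      have he : ((init.length : Int) + 2 - 1) = ((init.length + 1 : Nat) : Int) := by push_cast; ring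
      rw [he, PySem.List.pyGetD_natCast]
      simp [List.getD_eq_getElem?_getD]
    simp only [stingyLoop, stingyLoopAlt, h1, h2]
    split_ifs with h
    · have hrec := ih (init ++ [a]) b (a + b) (cl - (a + b))
      have hl : (init ++ [a, b]) ++ [a + b] = (init ++ [a]) ++ [b, a + b] := by
        simp
      have hc : ((init ++ [a]).length : Int) + 2 = ((init.length : Int) + 2) + 1 := by
        simp; ring
      rw [hl, ← hc, hrec, hc]
    · rfl

-- A's generous loop: starting with a list ending in p ≥ 1 it performs exactly j
-- doublings when 2p(2^j - 1) ≤ creditleft < 2p(2^(j+1) - 1).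
theorem genLoop_eval : ∀ (j fuel : Nat) (init : List Int) (p cl count : Int),
    1 ≤ p → 2 * p * (2 ^ j - 1) ≤ cl → cl < 2 * p * (2 ^ (j + 1) - 1) → j < fuel →
    genLoop fuel (init ++ [p]) cl count = count + j := by
  intro j
  induction j with
  | zero =>
    intro fuel init p cl count hp hlo hhi hfuel
    match fuel with
    | f + 1 =>
      simp only [genLoop, PySem.List.pyGetD_neg_one_append_singleton]
      have : ¬ cl ≥ p * 2 := by
        simp only [pow_succ, pow_zero] at hhi; push Not; linarith
      rw [if_neg this]
      simp
  | succ j ih =>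
    intro fuel init p cl count hp hlo hhi hfuel
    match fuel with
    | f + 1 =>
      simp only [genLoop, PySem.List.pyGetD_neg_one_append_singleton]
      have hX : (1:Int) ≤ 2 ^ j := one_le_pow₀ (by norm_num)
      have hcond : cl ≥ p * 2 := by
        simp only [pow_succ] at hlo; nlinarith
      rw [if_pos hcond]
      have hrec := ih f (init ++ [p]) (p * 2) (cl - p * 2) (count + 1)
        (by linarith)
        (by simp only [pow_succ] at hlo ⊢; ring_nf; ring_nf at hlo; linarith)
        (by simp only [pow_succ] at hhi ⊢; ring_nf; ring_nf at hhi; linarith)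
        (by omega)
      rw [hrec]
      push_cast
      ring

theorem gen_eq (tc : Int) :
    genLoop (tc.toNat + 1) [1] (tc - 1) 1
      = (if tc < 1 then 1 else max 1 ((PySem.Int.bitLength (tc + 1) : Int) - 1)) := by
  by_cases h1 : tc < 1
  · rw [if_pos h1]
    have ht : tc.toNat = 0 := by omega
    rw [ht]
    have hg : PySem.List.pyGetD [(1:Int)] (-1) 0 = 1 := by decide
    simp only [genLoop, hg]
    rw [if_neg (by omega)]
  · rw [if_neg h1]
    have htc : 1 ≤ tc := by omega
    set L := PySem.Int.bitLength (tc + 1) with hLdef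
    have hL2 : (tc + 1).natAbs < 2 ^ L := PySem.Int.lt_two_pow_bitLength (tc + 1)
    have hL1 : 2 ^ (L - 1) ≤ (tc + 1).natAbs :=
      PySem.Int.two_pow_bitLength_le (tc + 1) (by omega)
    have hLge : 2 ≤ L := by
      by_contra hc
      have : (2:Nat) ^ L ≤ 2 ^ 1 := Nat.pow_le_pow_right (by norm_num) (by omega)
      omega
    have hself : L - 1 < 2 ^ (L - 1) := Nat.lt_two_pow_self
    have hev := genLoop_eval (L - 2) (tc.toNat + 1) [] 1 (tc - 1) 1
      (le_refl 1)
      (by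
        have : ((2:Nat) ^ (L - 1) : Int) ≤ tc + 1 := by
          have := hL1; zify at this; omega
        rw [show L - 1 = (L - 2) + 1 by omega] at this
        push_cast [pow_succ] at this ⊢
        linarith)
      (by
        have : tc + 1 < ((2:Nat) ^ L : Int) := by
          have := hL2; zify at this; omega
        rw [show L = (L - 2) + 1 + 1 by omega] at this
        push_cast [pow_succ] at this ⊢
        linarith)
      (by omega)
    simp only [List.nil_append] at hev
    rw [hev]
    have : max (1:Int) ((L:Int) - 1) = (L:Int) - 1 := by
      rw [max_eq_right]; omega
    rw [this]
    omega


-- ===== VERDICT (by name: the statement is the Claim_ definition above) =====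
theorem solution_spec : Claim_equal_solution := by
  intro tc _
  unfold Spec_solution
  simp only [solution, solution_alt]
  rw [gen_eq tc]
  congr 1
  split_ifs with h
  · simpa using stingy_eq (tc.toNat + 1) [] 1 1 (tc - 2)
  · rfl
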